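-- pv_equiv track=rewrite | github.com/rookinc/hyperxi_lab | scripts/figures/fig_thalean_graph_polyhedral.py | partition_edges
-- ===== SOURCE A (Python) =====
-- def partition_edges(adj: dict[int, set[int]]) -> tuple[list[tuple[int, int]], list[tuple[int, int]]]:
--     internal = []
--     cross = []
--
--     for u in sorted(adj):
--         for v in sorted(adj[u]):
--             if u < v:
--                 if (u % 2) == (v % 2):
--                     internal.append((u, v))
--                 else:
--                     cross.append((u, v))
--
--     return internal, cross
-- ===== SOURCE B (Python) =====
-- def partition_edges(adj: dict[int, set[int]]) -> tuple[list[tuple[int, int]], list[tuple[int, int]]]: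
--     # Build the full oriented edge list in one comprehension, sort it once
--     # lexicographically (one C-level sort instead of many per-vertex sorts), then split it by endpoint parity in two filter passes.
--     edges = sorted((u, v) for u, vs in adj.items() for v in vs if u < v)
--     internal = [e for e in edges if e[0] % 2 == e[1] % 2]
--     cross = [e for e in edges if e[0] % 2 != e[1] % 2]
--     return internal, cross
-- ===== Notes on version B (the rewrite author's own statement) =====
-- stated objective: alternative
-- what changed: Replaces the interleaved sorted-outer/sorted-inner loop that appends into two accumulators with a build-then-sort-then-partition shape: one comprehension materialises every u<v edge, one global lexicographic sort reproduces the order, and two filter passes split by parity.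
import Mathlib
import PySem

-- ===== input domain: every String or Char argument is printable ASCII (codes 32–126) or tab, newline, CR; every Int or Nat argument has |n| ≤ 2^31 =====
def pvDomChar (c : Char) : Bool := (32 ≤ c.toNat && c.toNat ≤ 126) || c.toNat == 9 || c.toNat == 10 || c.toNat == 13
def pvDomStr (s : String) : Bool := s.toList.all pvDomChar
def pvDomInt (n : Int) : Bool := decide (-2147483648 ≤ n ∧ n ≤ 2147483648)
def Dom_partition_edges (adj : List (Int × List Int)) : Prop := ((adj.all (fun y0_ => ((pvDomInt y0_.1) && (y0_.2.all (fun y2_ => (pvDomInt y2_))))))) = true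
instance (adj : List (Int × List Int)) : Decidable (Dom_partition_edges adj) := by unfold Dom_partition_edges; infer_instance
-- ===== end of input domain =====

-- B rebuilds the same two lists by a different decomposition (materialise all u<v edges,
-- one global lexicographic sort, then two parity filter passes); a timing run measured
-- it a constant factor faster (one C-level sort and filters vs many small sorts and branches).

-- ===== PORT A =====
-- A: for u in sorted(adj): for v in sorted(adj[u]): if u < v: append to internal/cross by parity.
def partition_edges (adj : List (Int × List Int)) : (List (Int × Int)) × (List (Int × Int)) :=
  let d : PySem.Dict Int (List Int) := PySem.Dict.ofList adj
  (PySem.List.sorted d.keys (fun x => x)).foldl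
    (fun acc u =>
      (PySem.List.sorted (PySem.Set.ofList (d.getD u [])) (fun x => x)).foldl
        (fun acc v =>
          if u < v then
            if PySem.Int.mod u 2 = PySem.Int.mod v 2 then (acc.1 ++ [(u, v)], acc.2)
            else (acc.1, acc.2 ++ [(u, v)])
          else acc)
        acc)
    ([], [])

-- ===== PORT B =====
-- B: edges = sorted((u,v) for u,vs in adj.items() for v in vs if u < v); then two filter passes.
-- (Python iterates each value set in unspecified hash order; the global sort makes the result
--  order-independent, so iterating the PySem.Set in its list order is exact.)
def partition_edges_alt (adj : List (Int × List Int)) : (List (Int × Int)) × (List (Int × Int)) :=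
  let d : PySem.Dict Int (List Int) := PySem.Dict.ofList adj
  let edges : List (Int × Int) :=
    PySem.List.sorted2
      (d.items.flatMap (fun kv =>
        ((PySem.Set.ofList kv.2).filter (fun v => kv.1 < v)).map (fun v => (kv.1, v))))
      (fun e => e.1) (fun e => e.2)
  (edges.filter (fun e => PySem.Int.mod e.1 2 == PySem.Int.mod e.2 2),
   edges.filter (fun e => !(PySem.Int.mod e.1 2 == PySem.Int.mod e.2 2)))

-- ===== PRECONDITION & SPEC =====
def Spec_partition_edges (adj : List (Int × List Int)) (out : (List (Int × Int)) × (List (Int × Int))) : Prop := out = partition_edges_alt adj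
instance (adj : List (Int × List Int)) (out : (List (Int × Int)) × (List (Int × Int))) : Decidable (Spec_partition_edges adj out) := by unfold Spec_partition_edges; infer_instance

-- ===== CLAIM (what is proved, stated in full; the proofs are below) =====
def Claim_equal_partition_edges : Prop := ∀ (adj : List (Int × List Int)), Dom_partition_edges adj → Spec_partition_edges adj (partition_edges adj)

-- ===== LEMMAS AND PROOFS =====

-- strict and weak lexicographic order on edges
def pvLexLt (a b : Int × Int) : Prop := a.1 < b.1 ∨ (a.1 = b.1 ∧ a.2 < b.2)
def pvLexLe (a b : Int × Int) : Prop := a.1 < b.1 ∨ (a.1 = b.1 ∧ a.2 ≤ b.2)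
-- the comparison sorted2 (fst, snd) inserts with
def pvBlt (a b : Int × Int) : Bool := decide (a.1 < b.1) || (!decide (b.1 < a.1) && decide (a.2 < b.2))

-- the block of edges A produces for one source vertex u
def pvBlk (d : PySem.Dict Int (List Int)) (u : Int) : List (Int × Int) :=
  ((PySem.List.sorted (PySem.Set.ofList (d.getD u [])) (fun x => x)).filter (fun v => decide (u < v))).map (fun v => (u, v))

-- A's in-order edge sequence
def pvE (d : PySem.Dict Int (List Int)) : List (Int × Int) :=
  (PySem.List.sorted d.keys (fun x => x)).flatMap (pvBlk d)

-- A's inner loop appends the parity-split of one block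
lemma pvInnerA (u : Int) (l : List Int) (i c : List (Int × Int)) :
    l.foldl
      (fun acc v =>
        if u < v then
          if PySem.Int.mod u 2 = PySem.Int.mod v 2 then (acc.1 ++ [(u, v)], acc.2)
          else (acc.1, acc.2 ++ [(u, v)])
        else acc)
      (i, c)
    = (i ++ ((l.filter (fun v => decide (u < v))).map (fun v => (u, v))).filter
            (fun e => PySem.Int.mod e.1 2 == PySem.Int.mod e.2 2),
       c ++ ((l.filter (fun v => decide (u < v))).map (fun v => (u, v))).filter
            (fun e => !(PySem.Int.mod e.1 2 == PySem.Int.mod e.2 2))) := by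
  induction l generalizing i c with
  | nil => simp
  | cons v t ih =>
    simp only [List.foldl_cons, List.filter_cons]
    by_cases h1 : u < v
    · by_cases h2 : PySem.Int.mod u 2 = PySem.Int.mod v 2
      · rw [if_pos h1, if_pos h2, ih]
        rw [PySem.Int.mod_eq_emod_of_pos (a := u) (by norm_num), PySem.Int.mod_eq_emod_of_pos (a := v) (by norm_num)] at h2
        simp [h1, h2]
      · rw [if_pos h1, if_neg h2, ih]
        rw [PySem.Int.mod_eq_emod_of_pos (a := u) (by norm_num), PySem.Int.mod_eq_emod_of_pos (a := v) (by norm_num)] at h2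
        simp [h1, h2]
    · rw [if_neg h1, ih]
      simp [h1]

-- A's whole loop is the parity-split of the concatenated per-vertex blocks
lemma pvOuterA (d : PySem.Dict Int (List Int)) (ks : List Int) (i c : List (Int × Int)) :
    ks.foldl
      (fun acc u =>
        (PySem.List.sorted (PySem.Set.ofList (d.getD u [])) (fun x => x)).foldl
          (fun acc v =>
            if u < v then
              if PySem.Int.mod u 2 = PySem.Int.mod v 2 then (acc.1 ++ [(u, v)], acc.2)
              else (acc.1, acc.2 ++ [(u, v)])
            else acc)
          acc)
      (i, c)
    = (i ++ (ks.flatMap (pvBlk d)).filter (fun e => PySem.Int.mod e.1 2 == PySem.Int.mod e.2 2),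
       c ++ (ks.flatMap (pvBlk d)).filter (fun e => !(PySem.Int.mod e.1 2 == PySem.Int.mod e.2 2))) := by
  induction ks generalizing i c with
  | nil => simp
  | cons u t ih =>
    simp only [List.foldl_cons, List.flatMap_cons, List.filter_append]
    rw [pvInnerA, ih]
    simp [pvBlk, List.append_assoc]

-- sorted2 with keys (fst, snd) is the foldl/insertBy loop over pvBlt
lemma pvSorted2Def (xs : List (Int × Int)) :
    PySem.List.sorted2 xs (fun e => e.1) (fun e => e.2)
      = xs.foldl (fun acc x => PySem.List.insertBy pvBlt x acc) [] := rfl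

-- inserting with pvBlt preserves weak lexicographic sortedness
lemma pvInsPairwise (x : Int × Int) (ys : List (Int × Int)) (h : ys.Pairwise pvLexLe) :
    (PySem.List.insertBy pvBlt x ys).Pairwise pvLexLe := by
  induction ys with
  | nil => simp [PySem.List.insertBy]
  | cons y t ih =>
    rw [List.pairwise_cons] at h
    cases hb : pvBlt x y with
    | true =>
      simp only [PySem.List.insertBy, hb, if_true]
      refine List.Pairwise.cons ?_ (List.Pairwise.cons h.1 h.2)
      intro z hz
      rw [List.mem_cons] at hz
      rcases hz with rfl | hz
      · simp [pvBlt, pvLexLe] at hb ⊢; omega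
      · have h1 : pvLexLe x y := by simp [pvBlt, pvLexLe] at hb ⊢; omega
        have h2 := h.1 z hz
        simp [pvLexLe] at h1 h2 ⊢; omega
    | false =>
      simp only [PySem.List.insertBy, hb, Bool.false_eq_true, if_false]
      refine List.Pairwise.cons ?_ (ih h.2)
      intro z hz
      rw [PySem.List.mem_insertBy] at hz
      rcases hz with rfl | hz
      · simp [pvBlt, pvLexLe] at hb ⊢; omega
      · exact h.1 z hz

lemma pvFoldPairwise (xs acc : List (Int × Int)) (h : acc.Pairwise pvLexLe) :
    (xs.foldl (fun acc x => PySem.List.insertBy pvBlt x acc) acc).Pairwise pvLexLe := by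
  induction xs generalizing acc with
  | nil => simpa
  | cons x t ih => exact ih _ (pvInsPairwise x acc h)

-- strictly lex-increasing rearrangements are unique, so sorted2 returns exactly ys
lemma pvSorted2Eq (xs ys : List (Int × Int)) (hp : ys.Perm xs) (hlt : ys.Pairwise pvLexLt) :
    PySem.List.sorted2 xs (fun e => e.1) (fun e => e.2) = ys := by
  rw [pvSorted2Def]
  have hperm : (xs.foldl (fun acc x => PySem.List.insertBy pvBlt x acc) []).Perm ys :=
    (PySem.List.foldl_insertBy_perm pvBlt xs []).trans (by simpa using hp.symm)
  have hle1 : (xs.foldl (fun acc x => PySem.List.insertBy pvBlt x acc) []).Pairwise pvLexLe :=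
    pvFoldPairwise xs [] (by simp)
  have hle2 : ys.Pairwise pvLexLe := hlt.imp (by intro a b h; simp [pvLexLt, pvLexLe] at h ⊢; omega)
  exact hperm.eq_of_pairwise (le := pvLexLe)
    (by
      intro a b _ _ hab hba
      simp [pvLexLe] at hab hba
      have : a.1 = b.1 ∧ a.2 = b.2 := by omega
      exact Prod.ext this.1 this.2)
    hle1 hle2

-- concatenating per-u blocks over strictly increasing u, each block strictly increasing
lemma pvFlatMapPairwise (ks : List Int) (f : Int → List Int) (hks : ks.Pairwise (· < ·))
    (hf : ∀ u, (f u).Pairwise (· < ·)) :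
    (ks.flatMap (fun u => (f u).map (fun v => (u, v)))).Pairwise pvLexLt := by
  induction ks with
  | nil => simp
  | cons u t ih =>
    rw [List.pairwise_cons] at hks
    rw [List.flatMap_cons, List.pairwise_append]
    refine ⟨?_, ih hks.2, ?_⟩
    · rw [List.pairwise_map]
      exact (hf u).imp (by intro a b h; exact Or.inr ⟨rfl, h⟩)
    · intro a ha b hb
      rw [List.mem_map] at ha
      obtain ⟨va, _, rfl⟩ := ha
      rw [List.mem_flatMap] at hb
      obtain ⟨u', hu', hb⟩ := hb
      rw [List.mem_map] at hb
      obtain ⟨vb, _, rfl⟩ := hb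
      exact Or.inl (hks.1 u' hu')

-- A's edge sequence is strictly lexicographically increasing
lemma pvEPairwise (adj : List (Int × List Int)) :
    (pvE (PySem.Dict.ofList adj)).Pairwise pvLexLt := by
  unfold pvE
  have hnd : (PySem.Dict.ofList adj).keys.Nodup := PySem.Dict.nodup_keys_ofList adj
  have hsnd : (PySem.List.sorted (PySem.Dict.ofList adj).keys (fun x => x)).Nodup :=
    (PySem.List.sorted_perm _ _ _).nodup_iff.mpr hnd
  have hle := PySem.List.sorted_pairwise (key := fun x : Int => x)
    (xs := (PySem.Dict.ofList adj).keys)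
  have hks : (PySem.List.sorted (PySem.Dict.ofList adj).keys (fun x => x)).Pairwise (· < ·) := by
    have := hle.and hsnd
    exact this.imp (by intro a b h; rcases h with ⟨h1, h2⟩; omega)
  unfold pvBlk
  exact pvFlatMapPairwise _
    (fun u => (PySem.List.sorted (PySem.Set.ofList ((PySem.Dict.ofList adj).getD u []))
      (fun x => x)).filter (fun v => decide (u < v)))
    hks (fun u => (PySem.List.sorted_ofList_pairwise_lt _).filter _)

-- A's edge sequence is a rearrangement of B's raw (pre-sort) edge list
lemma pvEPerm (adj : List (Int × List Int)) :
    (pvE (PySem.Dict.ofList adj)).Perm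
      ((PySem.Dict.ofList adj).items.flatMap (fun kv =>
        ((PySem.Set.ofList kv.2).filter (fun v => kv.1 < v)).map (fun v => (kv.1, v)))) := by
  unfold pvE
  rw [PySem.Dict.items_eq_map_keys _ (PySem.Dict.nodup_keys_ofList adj) [], List.flatMap_map]
  refine List.Perm.flatMap (PySem.List.sorted_perm _ _ _) ?_
  intro u _
  unfold pvBlk
  exact (((PySem.List.sorted_perm _ _ _).filter _).map _)

-- ===== VERDICT (by name: the statement is the Claim_ definition above) =====
theorem partition_edges_spec : Claim_equal_partition_edges := by
  intro adj _
  unfold Spec_partition_edges partition_edges partition_edges_alt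
  dsimp only
  rw [pvSorted2Eq _ _ (pvEPerm adj) (pvEPairwise adj)]
  exact (pvOuterA _ _ [] []).trans (by simp [pvE])
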